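-- pv_equiv track=rewrite | github.com/Chirag363/GDHS | Agentic-AI/agents/triage.py | _has_moderate_symptoms
-- ===== SOURCE A (Python) =====
-- def _has_moderate_symptoms(symptoms: str) -> bool:
--     """Check if symptoms indicate moderate condition."""
--     if not symptoms:
--         return False
--
--     symptoms_lower = symptoms.lower()
--     moderate_keywords = [
--         "pain", "swelling", "bruising", "stiffness",
--         "difficulty moving", "tender", "sore"
--     ]
--
--     return any(keyword in symptoms_lower for keyword in moderate_keywords)
-- ===== SOURCE B (Python) =====
-- def _has_moderate_symptoms(symptoms: str) -> bool:
--     """Check if symptoms indicate moderate condition."""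
--     keywords = ("pain", "swelling", "bruising", "stiffness",
--                 "difficulty moving", "tender", "sore")
--     s = symptoms.lower()
--     for i in range(len(s)):
--         if s.startswith(keywords, i):
--             return True
--     return False
-- ===== Notes on version B (the rewrite author's own statement) =====
-- stated objective: alternative
-- what changed: Replaces the per-keyword loop of independent substring-membership scans by a single left-to-right pass over the string that tests at each position whether any keyword starts there (tuple form of str.startswith), eliminating the keyword-level any-loop.
import Mathlib
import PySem

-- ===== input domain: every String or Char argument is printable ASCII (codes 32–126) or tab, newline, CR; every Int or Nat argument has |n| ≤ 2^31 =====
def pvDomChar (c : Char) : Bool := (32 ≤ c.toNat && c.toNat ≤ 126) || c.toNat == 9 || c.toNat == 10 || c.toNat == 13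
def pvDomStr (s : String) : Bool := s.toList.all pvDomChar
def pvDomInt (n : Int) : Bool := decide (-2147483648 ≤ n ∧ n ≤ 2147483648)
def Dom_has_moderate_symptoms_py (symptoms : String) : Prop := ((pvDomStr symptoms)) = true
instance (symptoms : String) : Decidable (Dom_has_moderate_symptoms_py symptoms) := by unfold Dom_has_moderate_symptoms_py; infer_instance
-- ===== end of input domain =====

-- B replaces the per-keyword 'in' scans by one left-to-right pass testing each position
-- for a keyword prefix (tuple startswith); alternative decomposition, no speed claim.

-- ===== PORT A =====
def has_moderate_symptoms_py (symptoms : String) : Bool :=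
  -- if not symptoms: return False
  if symptoms.toList = [] then false
  else
    -- symptoms_lower = symptoms.lower()
    let symptoms_lower := PySem.Str.lower symptoms
    -- any(keyword in symptoms_lower for keyword in moderate_keywords)
    (["pain", "swelling", "bruising", "stiffness",
      "difficulty moving", "tender", "sore"] : List String).any
      (fun keyword => PySem.Str.isIn keyword symptoms_lower)

-- ===== PORT B =====
def pvKeywordsB : List String :=
  ["pain", "swelling", "bruising", "stiffness", "difficulty moving", "tender", "sore"]

def has_moderate_symptoms_py_alt (symptoms : String) : Bool :=
  -- s = symptoms.lower(); for i in range(len(s)): if s.startswith(keywords, i): return True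
  let s := (PySem.Str.lower symptoms).toList
  (PySem.List.pyRange 0 (s.length : Int) 1).any
    (fun i =>
      -- exact: for 0 ≤ i, s.startswith(tup, i) is 'some member of tup is a prefix of s[i:]'
      pvKeywordsB.any (fun kw => PySem.Chars.startswith (s.drop i.toNat) kw.toList))

-- ===== PRECONDITION & SPEC =====
def Spec_has_moderate_symptoms_py (symptoms : String) (out : Bool) : Prop := out = has_moderate_symptoms_py_alt symptoms
instance (symptoms : String) (out : Bool) : Decidable (Spec_has_moderate_symptoms_py symptoms out) := by unfold Spec_has_moderate_symptoms_py; infer_instance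

-- ===== CLAIM (what is proved, stated in full; the proofs are below) =====
def Claim_equal_has_moderate_symptoms_py : Prop := ∀ (symptoms : String), Dom_has_moderate_symptoms_py symptoms → Spec_has_moderate_symptoms_py symptoms (has_moderate_symptoms_py symptoms)

-- ===== LEMMAS AND PROOFS =====

-- B's position scan finds a keyword iff some keyword is a substring (keywords are nonempty).
lemma altScan_eq_anyIsIn (s : List Char) :
    ((PySem.List.pyRange 0 (s.length : Int) 1).any
      (fun i => pvKeywordsB.any (fun kw => PySem.Chars.startswith (s.drop i.toNat) kw.toList)))
    = pvKeywordsB.any (fun kw => PySem.Chars.isIn kw.toList s) := by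
  rw [Bool.eq_iff_iff]
  simp only [List.any_eq_true, PySem.List.mem_pyRange_one, PySem.Chars.startswith_iff,
    ← PySem.Chars.exists_prefix_drop_iff_isIn]
  constructor
  · rintro ⟨i, ⟨h0, hn⟩, kw, hkw, hp⟩
    exact ⟨kw, hkw, i.toNat, hp⟩
  · rintro ⟨kw, hkw, j, hp⟩
    by_cases hj : j < s.length
    · exact ⟨(j : Int), ⟨by positivity, by exact_mod_cast hj⟩, kw, hkw, by simpa using hp⟩
    · exfalso
      rw [List.drop_eq_nil_of_le (by omega)] at hp
      have hne : kw.toList ≠ [] := by fin_cases hkw <;> decide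
      exact hne (List.prefix_nil.mp hp)

-- ===== VERDICT (by name: the statement is the Claim_ definition above) =====
theorem has_moderate_symptoms_py_spec : Claim_equal_has_moderate_symptoms_py := by
  intro symptoms _
  unfold Spec_has_moderate_symptoms_py has_moderate_symptoms_py has_moderate_symptoms_py_alt
  rw [altScan_eq_anyIsIn]
  by_cases h : symptoms.toList = []
  · simp [h, pvKeywordsB, PySem.Chars.lower]
    decide
  · simp [h, pvKeywordsB]
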